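-- pv_equiv track=rewrite | github.com/DiGer99/performance_lab_tasks | task1/utils_task1.py | way_array
-- ===== SOURCE A (Python) =====
-- class Node:
--     head = None
--
--     def __init__(self, value):
--         self.value = value
--         self.next_node = None
--
--         if Node.head is None:
--             Node.head = self
--
-- def way_array(
--     n: int,
--     m: int,
-- ) -> str:
--     Node.head = None
--     head = Node(1)
--     current = head
--     res = []
--     for num in range(2, n + 1):
--         current.next_node = Node(num)
--         current = current.next_node
--
--     current.next_node = head
--     res.append(head.value)
--     current = head
--
--     for i in range(m - 1):
--         current = current.next_node
--
--     while current != head: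
--         res.append(current.value)
--         for i in range(m - 1):
--             current = current.next_node
--
--     return "".join(map(str, res))
-- ===== SOURCE B (Python) =====
-- def way_array(n, m):
--     # Ring of values 1..n modelled by index arithmetic: one O(1) modular jump
--     # per emitted element instead of m-1 pointer hops through a linked list.
--     ring = n if n > 1 else 1          # A's ring always contains the head node 1
--     step = (m - 1) % ring if m > 1 else 0
--     parts = []
--     pos = 0
--     while True:
--         parts.append(str(pos + 1))
--         pos = (pos + step) % ring
--         if pos == 0:
--             return "".join(parts)
-- ===== Notes on version B (the rewrite author's own statement) =====
-- stated objective: faster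
-- what changed: B drops A's mutable circular linked list entirely and walks the ring by modular index arithmetic, one O(1) jump pos=(pos+step)%ring per emitted element (with step pre-reduced mod ring) instead of A's m-1 pointer hops per element.
import Mathlib
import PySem

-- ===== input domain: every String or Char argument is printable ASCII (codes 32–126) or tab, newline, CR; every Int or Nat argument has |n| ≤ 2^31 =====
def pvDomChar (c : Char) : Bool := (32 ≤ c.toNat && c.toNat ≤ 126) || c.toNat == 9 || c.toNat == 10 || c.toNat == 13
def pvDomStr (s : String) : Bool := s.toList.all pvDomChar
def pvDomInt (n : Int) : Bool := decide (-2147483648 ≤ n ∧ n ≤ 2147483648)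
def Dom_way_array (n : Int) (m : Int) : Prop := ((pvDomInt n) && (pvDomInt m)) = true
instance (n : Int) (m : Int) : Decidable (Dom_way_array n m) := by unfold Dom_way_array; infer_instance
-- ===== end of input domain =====

-- B replaces A's circular linked list and its m-1 pointer hops per emitted
-- element by index arithmetic: one modular jump per element (objective: faster).

-- ===== PORT A =====
-- A's circular singly linked list is modelled by the list of node values
-- (built by the same append loop) plus the current node's index; following
-- 'next_node' is '(i+1) % length' (exact: the ring has 'length' nodes).

-- node-building loop: head = Node(1); 'for num in range(2, n+1): append Node(num)'
def wayVals (n : Int) : List Int :=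
  (PySem.List.pyRange 2 (n + 1) 1).foldl (fun acc num => acc ++ [num]) [1]

-- 'for i in range(m - 1): current = current.next_node'
def wayHop (L : Nat) (m : Int) (c : Nat) : Nat :=
  (PySem.List.pyRange 0 (m - 1) 1).foldl (fun cur _ => (cur + 1) % L) c

-- 'while current != head: res.append(current.value); <hop>'
-- (fuel L is a totalization guard; the Python loop revisits the head within L rounds)
def wayWhile (L : Nat) (m : Int) (vals : List Int) : Nat → Nat → List Int → List Int
  | 0, _, res => res
  | fuel + 1, c, res =>
      if c = 0 then res
      else wayWhile L m vals fuel (wayHop L m c) (res ++ [vals.getD c 0])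

def way_array (n : Int) (m : Int) : String :=
  let vals := wayVals n
  let L := vals.length
  let res : List Int := [vals.getD 0 0]      -- res.append(head.value)
  let c := wayHop L m 0                       -- first hop from head
  PySem.Str.join "" ((wayWhile L m vals L c res).map PySem.Int.toStr)

-- ===== PORT B =====
-- 'while True: parts.append(str(pos+1)); pos = (pos+step) % ring; if pos == 0: return'
-- (fuel ring+1 is a totalization guard; the loop body runs at most ring times)
def altLoop (ring step : Nat) : Nat → Nat → List String → List String
  | 0, _, parts => parts
  | fuel + 1, pos, parts =>
      let parts' := parts ++ [PySem.Int.toStr ((pos : Int) + 1)]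
      let pos' := (pos + step) % ring
      if pos' = 0 then parts' else altLoop ring step fuel pos' parts'

def way_array_alt (n : Int) (m : Int) : String :=
  let ring : Nat := (if n > 1 then n else 1).toNat
  let step : Nat := (if m > 1 then PySem.Int.mod (m - 1) (ring : Int) else 0).toNat
  PySem.Str.join "" (altLoop ring step (ring + 1) 0 [])

-- ===== PRECONDITION & SPEC =====
def Spec_way_array (n : Int) (m : Int) (out : String) : Prop := out = way_array_alt n m
instance (n : Int) (m : Int) (out : String) : Decidable (Spec_way_array n m out) := by unfold Spec_way_array; infer_instance

-- ===== CLAIM (what is proved, stated in full; the proofs are below) =====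
def Claim_equal_way_array : Prop := ∀ (n : Int) (m : Int), Dom_way_array n m → Spec_way_array n m (way_array n m)

-- ===== LEMMAS AND PROOFS =====

-- the emitted value sequence, top-checked form (A's while-loop shape)
def emitA (L step : Nat) : Nat → Nat → List Int
  | 0, _ => []
  | fuel + 1, c => if c = 0 then [] else ((c : Int) + 1) :: emitA L step fuel ((c + step) % L)

theorem emitA_zero (L step fuel : Nat) : emitA L step fuel 0 = [] := by
  cases fuel <;> simp [emitA]

theorem foldl_append_id {α : Type} (l : List α) (init : List α) :
    l.foldl (fun acc x => acc ++ [x]) init = init ++ l := by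
  induction l generalizing init with
  | nil => simp
  | cons x xs ih => simp [List.foldl_cons, ih]

theorem wayVals_eq (n : Int) :
    wayVals n = 1 :: PySem.List.pyRange 2 (n + 1) 1 := by
  rw [wayVals, foldl_append_id]; rfl

theorem wayVals_length (n : Int) :
    (wayVals n).length = (if n > 1 then n else 1).toNat := by
  rw [wayVals_eq]
  simp [PySem.List.length_pyRange_one]
  omega

theorem wayVals_getD (n : Int) (c : Nat) (hc : c < (wayVals n).length) :
    (wayVals n).getD c 0 = (c : Int) + 1 := by
  rw [wayVals_eq] at *
  cases c with
  | zero => simp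
  | succ k =>
    simp only [List.getD_cons_succ, List.length_cons] at *
    rw [PySem.List.pyRange_one] at *
    simp only [List.length_map, List.length_range] at hc
    rw [List.getD_eq_getElem _ _ (by simpa using hc)]
    simp
    ring

theorem foldl_step_mod (L : Nat) (hL : 0 < L) (l : List Int) :
    ∀ c : Nat, c < L → l.foldl (fun cur _ => (cur + 1) % L) c = (c + l.length) % L := by
  induction l with
  | nil => intro c hc; simp [Nat.mod_eq_of_lt hc]
  | cons x xs ih =>
    intro c hc
    rw [List.foldl_cons, ih _ (Nat.mod_lt _ hL)]
    rw [Nat.mod_add_mod]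
    congr 1
    simp only [List.length_cons]
    omega

theorem wayHop_eq (L : Nat) (m : Int) (c : Nat) (hL : 0 < L) (hc : c < L) :
    wayHop L m c = (c + (if m > 1 then PySem.Int.mod (m - 1) (L : Int) else 0).toNat) % L := by
  rw [wayHop, foldl_step_mod L hL _ c hc, PySem.List.length_pyRange_one]
  simp only [Int.sub_zero]
  by_cases hm : m > 1
  · simp only [if_pos hm]
    rw [PySem.Int.mod_eq_emod_of_pos (by exact_mod_cast hL)]
    have hcast : ((m - 1).toNat : Int) % (L : Int) = (m - 1) % (L : Int) := by
      rw [Int.toNat_of_nonneg (by omega)]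
    have hnn : (0:Int) ≤ (m - 1) % (L : Int) := Int.emod_nonneg _ (by positivity)
    have h1 : ((m - 1) % (L : Int)).toNat = (m - 1).toNat % L := by
      have := hcast.symm
      push_cast at this
      omega
    rw [h1]
    conv_lhs => rw [Nat.add_mod]
    conv_rhs => rw [Nat.add_mod]
    simp [Nat.mod_mod_of_dvd]
  · simp only [if_neg hm]
    have h0 : (m - 1).toNat = 0 := by omega
    rw [h0]
    simp

theorem step_lt (L : Nat) (m : Int) (hL : 0 < L) :
    (if m > 1 then PySem.Int.mod (m - 1) (L : Int) else 0).toNat < L := by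
  by_cases hm : m > 1
  · simp only [if_pos hm]
    have := PySem.Int.mod_lt (m - 1) (b := (L : Int)) (by exact_mod_cast hL)
    omega
  · simp only [if_neg hm]; omega

theorem wayWhile_emit (L : Nat) (m : Int) (n : Int) (hv : (wayVals n).length = L)
    (hL : 0 < L) (st : Nat) (hst : st = (if m > 1 then PySem.Int.mod (m - 1) (L : Int) else 0).toNat) :
    ∀ fuel (c : Nat) (res : List Int), c < L →
      wayWhile L m (wayVals n) fuel c res = res ++ emitA L st fuel c := by
  intro fuel
  induction fuel with
  | zero => intro c res hc; simp [wayWhile, emitA]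
  | succ f ih =>
    intro c res hc
    by_cases hc0 : c = 0
    · simp [wayWhile, emitA, hc0]
    · rw [wayWhile, emitA, if_neg hc0, if_neg hc0]
      rw [wayHop_eq L m c hL hc, ← hst]
      rw [ih _ _ (Nat.mod_lt _ hL)]
      rw [wayVals_getD n c (hv ▸ hc)]
      simp

theorem altLoop_emit (ring step : Nat) (hr : 0 < ring) :
    ∀ fuel (pos : Nat) (parts : List String), pos < ring → pos ≠ 0 →
      altLoop ring step fuel pos parts = parts ++ (emitA ring step fuel pos).map PySem.Int.toStr := by
  intro fuel
  induction fuel with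
  | zero => intro pos parts _ _; simp [altLoop, emitA]
  | succ f ih =>
    intro pos parts hp hp0
    rw [altLoop, emitA, if_neg hp0]
    by_cases h' : (pos + step) % ring = 0
    · simp [h', emitA_zero]
    · rw [if_neg h', ih _ _ (Nat.mod_lt _ hr) h']
      simp

-- ===== VERDICT (by name: the statement is the Claim_ definition above) =====
theorem way_array_spec : Claim_equal_way_array := by
  intro n m _
  show way_array n m = way_array_alt n m
  rw [way_array, way_array_alt]
  set L := (wayVals n).length with hvL
  have hL : 0 < L := by rw [hvL, wayVals_eq]; simp
  have hring : (if n > 1 then n else 1).toNat = L := (wayVals_length n).symm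
  rw [hring]
  set st : Nat := (if m > 1 then PySem.Int.mod (m - 1) (L : Int) else 0).toNat with hst
  have hstlt : st < L := step_lt L m hL
  have hc0 : wayHop L m 0 = st := by
    rw [wayHop_eq L m 0 hL hL, Nat.zero_add]
    exact Nat.mod_eq_of_lt hstlt
  rw [hc0, wayVals_getD n 0 hL]
  rw [wayWhile_emit L m n rfl hL st rfl _ st _ hstlt]
  -- unroll B's loop once
  rw [altLoop]
  simp only [Nat.zero_add, Nat.mod_eq_of_lt hstlt]
  by_cases h0 : st = 0
  · rw [if_pos h0, h0, emitA_zero]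
    simp
  · rw [if_neg h0, altLoop_emit L st hL L st _ hstlt h0]
    simp
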